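-- pv_equiv track=rewrite | github.com/jonathonreilly/toy-physics | scripts/frontier_yt_pr230_higher_shell_source_higgs_operator_certificate_boundary.py | option_value
-- ===== SOURCE A (Python) =====
-- def option_value(tokens: list[str], option: str) -> str | None:
--     if option in tokens:
--         index = tokens.index(option)
--         if index + 1 < len(tokens):
--             return tokens[index + 1]
--     prefix = option + "="
--     for token in tokens:
--         if token.startswith(prefix):
--             return token[len(prefix) :]
--     return None
-- ===== SOURCE B (Python) =====
-- def option_value(tokens: list[str], option: str) -> str | None:
--     prefix = option + "="
--     candidate = None
--     for i, token in enumerate(tokens):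
--         if token == option and i + 1 < len(tokens):
--             return tokens[i + 1]
--         if candidate is None and token.startswith(prefix):
--             candidate = token[len(prefix):]
--     return candidate
-- ===== Notes on version B (the rewrite author's own statement) =====
-- stated objective: alternative
-- what changed: A's membership test + index lookup + separate prefix scan are replaced by one enumerate loop that returns on the first exact flag with a successor and otherwise remembers the first 'option='-prefixed value as a candidate.
import Mathlib
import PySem

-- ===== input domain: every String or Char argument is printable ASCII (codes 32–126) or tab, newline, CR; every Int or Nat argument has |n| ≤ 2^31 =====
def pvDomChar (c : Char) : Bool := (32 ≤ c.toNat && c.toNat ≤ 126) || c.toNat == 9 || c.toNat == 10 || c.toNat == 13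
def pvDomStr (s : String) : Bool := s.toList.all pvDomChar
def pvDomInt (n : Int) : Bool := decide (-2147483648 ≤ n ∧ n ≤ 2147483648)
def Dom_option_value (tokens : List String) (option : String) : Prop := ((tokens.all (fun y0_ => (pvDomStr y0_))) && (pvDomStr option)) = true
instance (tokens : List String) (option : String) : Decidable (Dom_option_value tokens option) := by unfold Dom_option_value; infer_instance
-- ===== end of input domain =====

-- ===== PORT A =====
-- B replaces A's membership test + index lookup + separate prefix scan by one indexed
-- loop that returns on the first exact flag with a successor and otherwise remembers
-- the first "option="-prefixed value as a candidate (objective: alternative decomposition).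

-- the 'for token in tokens: if token.startswith(prefix): return token[len(prefix):]' loop of A
def pvScanPrefix (pfx : String) : List String → Option String
  | [] => none
  | t :: rest =>
    if PySem.Str.startswith t pfx then some (PySem.Str.slice t (some (PySem.Str.len pfx)) none)
    else pvScanPrefix pfx rest

def option_value (tokens : List String) (option : String) : Option String :=
  let pfx := option ++ "="
  if tokens.contains option then
    match PySem.List.index? tokens option with
    | some index =>
      if (index : Int) + 1 < tokens.length then PySem.List.pyGet? tokens ((index : Int) + 1)
      else pvScanPrefix pfx tokens
    | none => pvScanPrefix pfx tokens   -- unreachable: 'option in tokens' held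
  else pvScanPrefix pfx tokens

-- ===== PORT B =====
-- the 'for i, token in enumerate(tokens)' loop of B, carrying i and the candidate
def pvAltLoop (tokens : List String) (option pfx : String) :
    List String → Nat → Option String → Option String
  | [], _, candidate => candidate
  | t :: rest, i, candidate =>
    if t = option ∧ (i : Int) + 1 < tokens.length then
      PySem.List.pyGet? tokens ((i : Int) + 1)
    else
      pvAltLoop tokens option pfx rest (i + 1)
        (if candidate = none ∧ PySem.Str.startswith t pfx then
           some (PySem.Str.slice t (some (PySem.Str.len pfx)) none)
         else candidate)

def option_value_alt (tokens : List String) (option : String) : Option String :=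
  let pfx := option ++ "="
  pvAltLoop tokens option pfx tokens 0 none

-- ===== PRECONDITION & SPEC =====
def Spec_option_value (tokens : List String) (option : String) (out : Option String) : Prop := out = option_value_alt tokens option
instance (tokens : List String) (option : String) (out : Option String) : Decidable (Spec_option_value tokens option out) := by unfold Spec_option_value; infer_instance

-- ===== CLAIM (what is proved, stated in full; the proofs are below) =====
def Claim_equal_option_value : Prop := ∀ (tokens : List String) (option : String), Dom_option_value tokens option → Spec_option_value tokens option (option_value tokens option)

-- ===== LEMMAS AND PROOFS =====

-- common reference shape: the first occurrence of `option` determines the successor (if any)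
def pvFirstSucc (option : String) : List String → Option String
  | [] => none
  | t :: rest => if t = option then rest.head? else pvFirstSucc option rest

lemma pvFirstSucc_of_not_mem (option : String) (l : List String) (h : option ∉ l) :
    pvFirstSucc option l = none := by
  induction l with
  | nil => rfl
  | cons t rest ih =>
    simp only [List.mem_cons, not_or] at h
    simp [pvFirstSucc, Ne.symm h.1, ih h.2]

lemma pvFirstSucc_append (option : String) (pre suf : List String) (h : option ∉ pre) :
    pvFirstSucc option (pre ++ option :: suf) = suf.head? := by
  induction pre with
  | nil => simp [pvFirstSucc]
  | cons t rest ih =>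
    simp only [List.mem_cons, not_or] at h
    simpa [pvFirstSucc, Ne.symm h.1] using ih h.2

-- `option` never starts with `option ++ "="`
lemma pv_no_self_prefix (option : String) :
    PySem.Str.startswith option (option ++ "=") = false := by
  by_contra h
  rw [Bool.not_eq_false, PySem.Str.startswith_eq, PySem.Chars.startswith_iff,
      String.toList_append] at h
  have := h.length_le
  simp at this

-- A computes the reference shape
lemma pvA_eq (tokens : List String) (option : String) :
    option_value tokens option =
      match pvFirstSucc option tokens with
      | some v => some v
      | none => pvScanPrefix (option ++ "=") tokens := by
  unfold option_value
  by_cases hm : option ∈ tokens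
  · have hc : tokens.contains option = true := by simpa using hm
    obtain ⟨k, hk⟩ : ∃ k, PySem.List.index? tokens option = some k := by
      have := (PySem.List.index?_isSome_iff (xs := tokens) (v := option)).2 hm
      exact Option.isSome_iff_exists.1 this
    obtain ⟨pre, suf, htk, hlen, hpre⟩ := (PySem.List.index?_eq_some_iff tokens option k).1 hk
    simp only [hc, hk, if_true]
    rw [htk, pvFirstSucc_append option pre suf hpre]
    by_cases hs : suf = []
    · subst hs
      have hlt : ¬ ((k : Int) + 1 < ((pre ++ [option]).length : Int)) := by
        simp [← hlen]
      rw [if_neg hlt]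
      rfl
    · obtain ⟨y, ys, rfl⟩ := List.exists_cons_of_ne_nil hs
      have hlt : (k : Int) + 1 < ((pre ++ option :: y :: ys).length : Int) := by
        simp [← hlen]
      have hget : PySem.List.pyGet? (pre ++ option :: y :: ys) ((k : Int) + 1) = some y := by
        have h1 : ((k : Int) + 1) = (((k + 1 : Nat) : Int)) := by push_cast; ring
        rw [h1, PySem.List.pyGet?_natCast, ← hlen]
        simp
      rw [if_pos hlt, hget]
      rfl
  · have hc : tokens.contains option = false := by simpa using hm
    rw [pvFirstSucc_of_not_mem option tokens hm]
    simp [hm]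

-- B's loop computes the reference shape with the candidate taking over after the scan
lemma pvAltLoop_eq (tokens : List String) (option : String)
    (hno : PySem.Str.startswith option (option ++ "=") = false) :
    ∀ (rest : List String) (i : Nat) (candidate : Option String),
      tokens.drop i = rest →
      pvAltLoop tokens option (option ++ "=") rest i candidate =
        match pvFirstSucc option rest with
        | some v => some v
        | none => candidate.or (pvScanPrefix (option ++ "=") rest) := by
  intro rest
  induction rest with
  | nil => intro i candidate _; cases candidate <;> simp [pvAltLoop, pvFirstSucc, pvScanPrefix]
  | cons t rs ih =>
    intro i candidate hdrop
    have hi : i < tokens.length := by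
      by_contra h
      rw [List.drop_eq_nil_of_le (by omega)] at hdrop
      exact List.cons_ne_nil t rs hdrop.symm
    have hdrop' : tokens.drop (i + 1) = rs := by
      have := congrArg List.tail hdrop
      simpa [List.tail_drop] using this
    have hlen : tokens.length = i + 1 + rs.length := by
      have := congrArg List.length hdrop
      simp at this; omega
    have hget : PySem.List.pyGet? tokens ((i : Int) + 1) = rs.head? := by
      have h1 : ((i : Int) + 1) = (((i + 1 : Nat) : Int)) := by push_cast; ring
      rw [h1, PySem.List.pyGet?_natCast, ← hdrop', List.head?_eq_getElem?,
          List.getElem?_drop]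
    by_cases ht : t = option
    · subst ht
      by_cases hrs : rs = []
      · subst hrs
        have hlt : ¬ ((i : Int) + 1 < (tokens.length : Int)) := by
          simp [hlen]
        have hno' : PySem.Chars.startswith (String.toList t) ((String.toList t) ++ ['=']) = false := by
          simpa using hno
        rw [pvAltLoop, if_neg (by simp [hlt])]
        cases candidate <;> simp [pvAltLoop, pvFirstSucc, pvScanPrefix, hno']
      · have hlt : (i : Int) + 1 < (tokens.length : Int) := by
          have : rs.length ≠ 0 := by simpa using hrs
          simp [hlen]; omega
        obtain ⟨y, ys, rfl⟩ := List.exists_cons_of_ne_nil hrs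
        simp [pvAltLoop, hlt, hget, pvFirstSucc, List.head?]
    · have hcond : ¬ (t = option ∧ (i : Int) + 1 < (tokens.length : Int)) := by
        intro h; exact ht h.1
      rw [pvAltLoop, if_neg hcond, ih (i + 1) _ hdrop']
      have hfs : pvFirstSucc option (t :: rs) = pvFirstSucc option rs := by
        simp [pvFirstSucc, ht]
      rw [hfs]
      cases hfsv : pvFirstSucc option rs with
      | some v => simp
      | none =>
        cases candidate with
        | some c => simp
        | none =>
          by_cases hsw : PySem.Str.startswith t (option ++ "=") = true
          · have hsw' : PySem.Chars.startswith t.toList ((String.toList option) ++ ['=']) = true := by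
              simpa using hsw
            simp [hsw', pvScanPrefix]
          · simp only [Bool.not_eq_true] at hsw
            have hsw' : PySem.Chars.startswith t.toList ((String.toList option) ++ ['=']) = false := by
              simpa using hsw
            simp [hsw', pvScanPrefix]

-- ===== VERDICT (by name: the statement is the Claim_ definition above) =====
theorem option_value_spec : Claim_equal_option_value := by
  intro tokens option _
  unfold Spec_option_value
  rw [pvA_eq]
  unfold option_value_alt
  rw [pvAltLoop_eq tokens option (pv_no_self_prefix option) tokens 0 none rfl]
  cases pvFirstSucc option tokens <;> simp
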